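-- pv_equiv track=rewrite | github.com/radio-crestin/radio-crestin-backend | backend_streams_transcoding/live_streaming/scripts/playlist_generator.py | _trim_to_contiguous
-- ===== SOURCE A (Python) =====
-- SegmentInfo = tuple
--
-- def _get_seg_num(seg: SegmentInfo, ext: str) -> int | None:
--     try:
--         return int(seg[0].replace(ext, ""))
--     except ValueError:
--         return None
--
-- def _trim_to_contiguous(segs: list[SegmentInfo], ext: str) -> list[SegmentInfo]:
--     """Trim segments to the last contiguous run (no gaps > 2 segment durations).
--     This prevents audio glitches from old segments surviving across pod restarts."""
--     if len(segs) <= 1: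
--         return segs
--     # Walk backwards from the end, find where a gap starts
--     last_contiguous_start = len(segs) - 1
--     for i in range(len(segs) - 1, 0, -1):
--         cur = _get_seg_num(segs[i], ext)
--         prev = _get_seg_num(segs[i - 1], ext)
--         if cur is not None and prev is not None and cur - prev > 2:
--             break
--         last_contiguous_start = i - 1
--     return segs[last_contiguous_start:]
-- ===== SOURCE B (Python) =====
-- def _get_seg_num(seg, ext):
--     try:
--         return int(seg[0].replace(ext, ""))
--     except ValueError:
--         return None
--
-- def _trim_to_contiguous(segs, ext):
--     if len(segs) <= 1:
--         return segs
--     # precompute numbers once, then one forward pass recording the last gap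
--     nums = [_get_seg_num(s, ext) for s in segs]
--     split = 0
--     for i in range(1, len(segs)):
--         if nums[i] is not None and nums[i - 1] is not None and nums[i] - nums[i - 1] > 2:
--             split = i
--     return segs[split:]
-- ===== Notes on version B (the rewrite author's own statement) =====
-- stated objective: simpler
-- what changed: Replaces the backward scan with early break and mutable last_contiguous_start by a precomputed nums table and a straight forward pass that records the index of the last gap, then slices there.
import Mathlib
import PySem

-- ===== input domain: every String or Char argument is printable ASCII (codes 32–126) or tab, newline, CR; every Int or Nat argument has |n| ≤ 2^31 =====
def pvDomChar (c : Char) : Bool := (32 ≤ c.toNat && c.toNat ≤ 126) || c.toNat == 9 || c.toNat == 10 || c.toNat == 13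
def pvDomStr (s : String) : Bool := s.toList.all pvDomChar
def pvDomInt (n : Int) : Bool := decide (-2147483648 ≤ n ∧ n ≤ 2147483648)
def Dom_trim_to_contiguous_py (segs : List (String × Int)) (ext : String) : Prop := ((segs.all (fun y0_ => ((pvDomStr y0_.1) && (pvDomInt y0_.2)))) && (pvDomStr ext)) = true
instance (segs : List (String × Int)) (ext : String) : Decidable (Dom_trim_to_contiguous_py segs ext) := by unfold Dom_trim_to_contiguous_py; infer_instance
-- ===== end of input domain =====

-- B restructures A's backward scan (with break) into a precomputed nums table plus one
-- forward pass recording the last gap index; same return value, no speed claim.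

-- ===== PORT A =====
-- _get_seg_num (shared helper of both Pythons): int(seg[0].replace(ext, "")), None on ValueError
def segNumPy (seg : String × Int) (ext : String) : Option Int :=
  PySem.Int.ofStr? (PySem.Str.replace seg.1 ext "")

-- the backward 'for i in range(len(segs)-1, 0, -1)' loop with its break; state = last_contiguous_start
def trimLoopA (segs : List (String × Int)) (ext : String) : List Int → Int → Int
  | [], lcs => lcs
  | i :: rest, lcs =>
    match segNumPy (PySem.List.pyGetD segs i ("", 0)) ext,
          segNumPy (PySem.List.pyGetD segs (i - 1) ("", 0)) ext with
    | some cur, some prev =>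
        if cur - prev > 2 then lcs else trimLoopA segs ext rest (i - 1)
    | _, _ => trimLoopA segs ext rest (i - 1)

def trim_to_contiguous_py (segs : List (String × Int)) (ext : String) : List (String × Int) :=
  if segs.length ≤ 1 then segs
  else
    let start := trimLoopA segs ext
      (PySem.List.pyRange ((segs.length : Int) - 1) 0 (-1)) ((segs.length : Int) - 1)
    PySem.List.slice segs (some start) none

-- ===== PORT B =====
def trim_to_contiguous_py_alt (segs : List (String × Int)) (ext : String) : List (String × Int) :=
  if segs.length ≤ 1 then segs
  else
    let nums := segs.map (fun s => segNumPy s ext)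
    let split := (PySem.List.pyRange 1 (segs.length : Int) 1).foldl
      (fun acc i =>
        match PySem.List.pyGetD nums i none, PySem.List.pyGetD nums (i - 1) none with
        | some c, some p => if c - p > 2 then i else acc
        | _, _ => acc) 0
    PySem.List.slice segs (some split) none

-- ===== PRECONDITION & SPEC =====
def Spec_trim_to_contiguous_py (segs : List (String × Int)) (ext : String) (out : List (String × Int)) : Prop := out = trim_to_contiguous_py_alt segs ext
instance (segs : List (String × Int)) (ext : String) (out : List (String × Int)) : Decidable (Spec_trim_to_contiguous_py segs ext out) := by unfold Spec_trim_to_contiguous_py; infer_instance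

-- ===== CLAIM (what is proved, stated in full; the proofs are below) =====
def Claim_equal_trim_to_contiguous_py : Prop := ∀ (segs : List (String × Int)) (ext : String), Dom_trim_to_contiguous_py segs ext → Spec_trim_to_contiguous_py segs ext (trim_to_contiguous_py segs ext)

-- ===== LEMMAS AND PROOFS =====

-- the gap test at index i, as A computes it
def gapAt (segs : List (String × Int)) (ext : String) (i : Int) : Bool :=
  match segNumPy (PySem.List.pyGetD segs i ("", 0)) ext,
        segNumPy (PySem.List.pyGetD segs (i - 1) ("", 0)) ext with
  | some cur, some prev => cur - prev > 2
  | _, _ => false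

-- a two-Option match with an if, rewritten as an if on the Bool-valued match
lemma match_aux {α : Type} (o1 o2 : Option Int) (x y : α) :
    (match o1, o2 with
     | some c, some p => if c - p > 2 then x else y
     | _, _ => y) =
    if (match o1, o2 with
        | some c, some p => decide (c - p > 2)
        | _, _ => false) then x else y := by
  cases o1 <;> cases o2 <;> simp

-- A's loop, abstracted over the gap predicate
def trimLoopGen (g : Int → Bool) : List Int → Int → Int
  | [], lcs => lcs
  | i :: rest, lcs => if g i then lcs else trimLoopGen g rest (i - 1)

lemma trimLoopA_eq_gen (segs : List (String × Int)) (ext : String) (l : List Int) (lcs : Int) :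
    trimLoopA segs ext l lcs = trimLoopGen (gapAt segs ext) l lcs := by
  induction l generalizing lcs with
  | nil => rfl
  | cons i rest ih =>
    simp only [trimLoopA, trimLoopGen]
    rw [match_aux]
    simp only [gapAt]
    split
    · rfl
    · exact ih _

-- backward first-match scan with break = forward fold recording the last match
lemma back_eq_forward (g : Int → Bool) (k : Nat) :
    trimLoopGen g (PySem.List.pyRange (k : Int) 0 (-1)) (k : Int) =
    (PySem.List.pyRange 1 ((k : Int) + 1) 1).foldl (fun acc i => if g i then i else acc) 0 := by
  induction k with
  | zero => simp [PySem.List.pyRange_neg_one_eq_nil, PySem.List.pyRange_one_eq_nil, trimLoopGen]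
  | succ k ih =>
    rw [PySem.List.pyRange_neg_one_cons (by exact_mod_cast Nat.succ_pos k)]
    rw [show ((k + 1 : Nat) : Int) + 1 = ((k : Int) + 1) + 1 by push_cast; ring,
        PySem.List.pyRange_one_succ_right (by omega)]
    rw [List.foldl_append]
    simp only [trimLoopGen, List.foldl_cons, List.foldl_nil]
    rw [show ((k + 1 : Nat) : Int) - 1 = (k : Int) by push_cast; ring]
    push_cast
    by_cases h : g ((k : Int) + 1) <;> simp [h, ih]

-- B's fold step over the nums table, rewritten through A's gapAt, for in-range i
lemma stepB_eq_stepA (segs : List (String × Int)) (ext : String) (acc i : Int)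
    (h1 : 1 ≤ i) (h2 : i < (segs.length : Int)) :
    (match PySem.List.pyGetD (segs.map (fun s => segNumPy s ext)) i none,
           PySem.List.pyGetD (segs.map (fun s => segNumPy s ext)) (i - 1) none with
     | some c, some p => if c - p > 2 then i else acc
     | _, _ => acc) = if gapAt segs ext i then i else acc := by
  have hi : PySem.List.pyGetD (segs.map (fun s => segNumPy s ext)) i none
      = segNumPy (PySem.List.pyGetD segs i ("", 0)) ext := by
    rw [PySem.List.pyGetD_eq_getElem _ none (by omega) (by simpa using h2),
        PySem.List.pyGetD_eq_getElem segs ("", 0) (by omega) h2]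
    simp
  have hi' : PySem.List.pyGetD (segs.map (fun s => segNumPy s ext)) (i - 1) none
      = segNumPy (PySem.List.pyGetD segs (i - 1) ("", 0)) ext := by
    rw [PySem.List.pyGetD_eq_getElem _ none (by omega) (by simp; omega),
        PySem.List.pyGetD_eq_getElem segs ("", 0) (by omega) (by omega)]
    have : (i - 1).toNat < segs.length := by omega
    simp
  rw [hi, hi', match_aux]
  simp only [gapAt]
  rfl

-- ===== VERDICT (by name: the statement is the Claim_ definition above) =====
theorem trim_to_contiguous_py_spec : Claim_equal_trim_to_contiguous_py := by
  intro segs ext _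
  unfold Spec_trim_to_contiguous_py trim_to_contiguous_py trim_to_contiguous_py_alt
  by_cases hlen : segs.length ≤ 1
  · simp [hlen]
  · simp only [hlen, if_false]
    have hn : 2 ≤ segs.length := by omega
    congr 1
    rw [trimLoopA_eq_gen]
    have hk : ((segs.length : Int) - 1) = ((segs.length - 1 : Nat) : Int) := by
      push_cast [Nat.cast_sub (by omega : 1 ≤ segs.length)]; ring
    rw [hk, back_eq_forward (gapAt segs ext) (segs.length - 1)]
    rw [show (((segs.length - 1 : Nat) : Int) + 1) = (segs.length : Int) by
      push_cast [Nat.cast_sub (by omega : 1 ≤ segs.length)]; ring]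
    congr 1
    refine (PySem.List.foldl_congr_mem _ _ _ 0 ?_).symm
    intro acc x hx
    have hm := PySem.List.mem_pyRange_one.mp hx
    exact stepB_eq_stepA segs ext acc x hm.1 hm.2
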